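-- pv_equiv track=rewrite | github.com/mattkendall11/QOSF_tasks | task_three.py | brute_force_solve
-- ===== SOURCE A (Python) =====
-- import itertools
--
-- def evaluate_qubo(Q, binary_vector):
--     """Evaluate the QUBO objective function for a given binary vector."""
--     score = 0
--     n = len(binary_vector)
--
--     for i in range(n):
--         for j in range(n):
--             if (i, j) in Q:
--                 score += Q[(i, j)] * binary_vector[i] * binary_vector[j]
--
--     return score
--
-- def brute_force_solve(Q, n):
--     """Brute force solver for the QUBO problem."""
--     best_score = float('inf')
--     best_solution = None
--
--     # Generate all possible binary vectors of length n
--     for binary_vector in itertools.product([0, 1], repeat=n):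
--         score = evaluate_qubo(Q, binary_vector)
--         if score < best_score:
--             best_score = score
--             best_solution = binary_vector
--
--     return best_solution, best_score
-- ===== SOURCE B (Python) =====
-- def brute_force_solve(Q, n):
--     """Brute force QUBO solver: enumerate bitmasks, scoring only Q's relevant entries."""
--     terms = []
--     for key, v in Q.items():
--         if len(key) == 2:
--             i, j = key
--             if 0 <= i < n and 0 <= j < n:
--                 terms.append((n - 1 - i, n - 1 - j, v))
--     best_m, best_s = 0, None
--     for m in range(1 << n):
--         s = 0
--         for bi, bj, v in terms:
--             if (m >> bi) & 1 and (m >> bj) & 1: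
--                 s += v
--         if best_s is None or s < best_s:
--             best_m, best_s = m, s
--     return tuple((best_m >> (n - 1 - i)) & 1 for i in range(n)), best_s
-- ===== Notes on version B (the rewrite author's own statement) =====
-- stated objective: alternative
-- what changed: B precomputes the in-range entries of Q once and scores each of the 2^n candidate bitmasks by summing only those entries whose two bits are set, instead of A's per-vector scan over all n^2 index pairs with a dict lookup per pair; the best vector is reconstructed from the best mask at the end.
import Mathlib
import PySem

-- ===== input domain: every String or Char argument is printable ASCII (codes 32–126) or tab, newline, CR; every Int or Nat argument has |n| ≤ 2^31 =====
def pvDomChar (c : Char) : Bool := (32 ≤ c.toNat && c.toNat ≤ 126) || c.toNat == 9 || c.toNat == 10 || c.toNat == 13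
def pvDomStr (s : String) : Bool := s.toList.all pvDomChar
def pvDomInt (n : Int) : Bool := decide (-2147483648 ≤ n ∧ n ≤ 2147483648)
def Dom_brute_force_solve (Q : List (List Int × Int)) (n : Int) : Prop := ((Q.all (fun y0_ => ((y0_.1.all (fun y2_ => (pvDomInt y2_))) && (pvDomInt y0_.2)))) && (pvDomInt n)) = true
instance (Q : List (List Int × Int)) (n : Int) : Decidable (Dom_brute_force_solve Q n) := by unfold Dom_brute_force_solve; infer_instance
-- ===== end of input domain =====

-- B enumerates bitmasks and scores each by summing only Q's in-range entries (those whose two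
-- bits are set) instead of A's per-vector scan over all n^2 index pairs (objective: alternative).
-- B enumerates bitmasks and scores each by summing only Q's in-range entries (those whose two
-- bits are set) instead of A's per-vector scan over all n^2 index pairs (objective: alternative).
-- ===== PORT A =====
-- float('inf') / best_solution=None initial state is modeled as `none`; both are updated together.
def evaluate_qubo (Q : List (List Int × Int)) (binary_vector : List Int) : Int :=
  let n : Int := binary_vector.length
  (PySem.List.pyRange 0 n 1).foldl (fun score i =>
    (PySem.List.pyRange 0 n 1).foldl (fun score j =>
      match (PySem.Dict.mk Q).get? [i, j] with
      | some v => score + v * PySem.List.pyGetD binary_vector i 0 * PySem.List.pyGetD binary_vector j 0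
      | none => score) score) 0

-- itertools.product([0,1], repeat=k): first coordinate varies slowest
def pyProduct01 : Nat → List (List Int)
  | 0 => [[]]
  | k + 1 => (pyProduct01 k).map (fun v => 0 :: v) ++ (pyProduct01 k).map (fun v => 1 :: v)

def brute_force_solve (Q : List (List Int × Int)) (n : Int) : List Int × Int :=
  let best := (pyProduct01 n.toNat).foldl (fun best binary_vector =>
    let score := evaluate_qubo Q binary_vector
    match best with
    | none => some (binary_vector, score)
    | some (_, bs) => if score < bs then some (binary_vector, score) else best) none
  match best with
  | some (v, s) => (v, s)
  | none => ([], 0)   -- unreachable: itertools.product is never empty for n ≥ 0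

-- ===== PORT B =====
-- terms: the in-range length-2 keys of Q, as bit positions (n-1-i, n-1-j) with their values
def pvTerms (Q : List (List Int × Int)) (n : Int) : List (Nat × Nat × Int) :=
  Q.foldl (fun ts kv =>
    match kv with
    | ([i, j], v) =>
      if 0 ≤ i ∧ i < n ∧ 0 ≤ j ∧ j < n then
        ts ++ [((n - 1 - i).toNat, (n - 1 - j).toNat, v)]
      else ts
    | _ => ts) []

-- (m >> bi) & 1 and (m >> bj) & 1  tested via Nat.testBit (the same shift-and-mask)
def pvScore (terms : List (Nat × Nat × Int)) (m : Nat) : Int :=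
  terms.foldl (fun s t => if m.testBit t.1 && m.testBit t.2.1 then s + t.2.2 else s) 0

def brute_force_solve_alt (Q : List (List Int × Int)) (n : Int) : List Int × Int :=
  let terms := pvTerms Q n
  let best := (List.range (2 ^ n.toNat)).foldl (fun (best : Nat × Option Int) m =>
    let s := pvScore terms m
    match best.2 with
    | none => (m, some s)
    | some bs => if s < bs then (m, some s) else best) (0, none)
  ((List.range n.toNat).map (fun i => if best.1.testBit (n.toNat - 1 - i) then (1 : Int) else 0),
   best.2.getD 0)

-- ===== PRECONDITION & SPEC =====
-- Pre_ excludes n < 0 (itertools.product raises ValueError there) and association lists with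
-- duplicate keys (they do not represent a Python dict, which is what A's parameter Q is).
def Pre_brute_force_solve (Q : List (List Int × Int)) (n : Int) : Prop :=
  0 ≤ n ∧ (Q.map Prod.fst).Nodup
instance (Q : List (List Int × Int)) (n : Int) : Decidable (Pre_brute_force_solve Q n) := by
  unfold Pre_brute_force_solve; infer_instance
def pvWitness_brute_force_solve : (List (List Int × Int)) × Int :=
  ([([0, 0], 2), ([0, 1], -3), ([1, 1], 1)], 2)
def Spec_brute_force_solve (Q : List (List Int × Int)) (n : Int) (out : List Int × Int) : Prop := out = brute_force_solve_alt Q n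
instance (Q : List (List Int × Int)) (n : Int) (out : List Int × Int) : Decidable (Spec_brute_force_solve Q n out) := by unfold Spec_brute_force_solve; infer_instance

-- ===== CLAIM (what is proved, stated in full; the proofs are below) =====
def Claim_equal_brute_force_solve : Prop := ∀ (Q : List (List Int × Int)) (n : Int), Dom_brute_force_solve Q n → Pre_brute_force_solve Q n → Spec_brute_force_solve Q n (brute_force_solve Q n)

-- ===== LEMMAS AND PROOFS =====

def pvVecOf (k m : Nat) : List Int :=
  (List.range k).map (fun i => if m.testBit (k - 1 - i) then (1 : Int) else 0)

theorem pvVecOf_length (k m : Nat) : (pvVecOf k m).length = k := by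
  simp [pvVecOf]

theorem pvVecOf_succ_lo (k m : Nat) (h : m < 2 ^ k) :
    pvVecOf (k + 1) m = 0 :: pvVecOf k m := by
  simp only [pvVecOf, List.range_succ_eq_map, List.map_cons, List.map_map]
  refine List.cons_eq_cons.mpr ⟨?_, ?_⟩
  · simp [Nat.testBit_lt_two_pow h]
  · exact List.map_congr_left (fun i hi => by
      simp only [Function.comp, Nat.succ_eq_add_one]
      rw [show k + 1 - 1 - (i + 1) = k - 1 - i by omega])

theorem pvVecOf_succ_hi (k m : Nat) (h : m < 2 ^ k) :
    pvVecOf (k + 1) (2 ^ k + m) = 1 :: pvVecOf k m := by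
  simp only [pvVecOf, List.range_succ_eq_map, List.map_cons, List.map_map]
  refine List.cons_eq_cons.mpr ⟨?_, ?_⟩
  · simp [Nat.testBit_two_pow_add_eq, Nat.testBit_lt_two_pow h]
  · exact List.map_congr_left (fun i hi => by
      simp only [Function.comp, Nat.succ_eq_add_one]
      rw [show k + 1 - 1 - (i + 1) = k - 1 - i by omega,
          Nat.testBit_two_pow_add_gt (by simp at hi; omega)])

theorem pyProduct01_eq (k : Nat) :
    pyProduct01 k = (List.range (2 ^ k)).map (pvVecOf k) := by
  induction k with
  | zero => simp [pyProduct01, pvVecOf]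
  | succ k ih =>
    rw [pyProduct01, ih, pow_succ, mul_two, List.range_add, List.map_append,
        List.map_map, List.map_map, List.map_map]
    refine congrArg₂ _ ?_ ?_
    · exact (List.map_congr_left (fun m hm => by
        simp only [Function.comp]
        rw [pvVecOf_succ_lo k m (by simpa using hm)])).symm
    · exact (List.map_congr_left (fun m hm => by
        simp only [Function.comp]
        rw [pvVecOf_succ_hi k m (by simpa using hm)])).symm

-- filterMap form of pvTerms
def pvF (n : Int) (kv : List Int × Int) : Option (Nat × Nat × Int) :=
  match kv with
  | ([i, j], v) =>
    if 0 ≤ i ∧ i < n ∧ 0 ≤ j ∧ j < n then some ((n - 1 - i).toNat, (n - 1 - j).toNat, v)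
    else none
  | _ => none

theorem pvTerms_eq (Q : List (List Int × Int)) (n : Int) :
    pvTerms Q n = Q.filterMap (pvF n) := by
  suffices h : ∀ (Q : List (List Int × Int)) (acc : List (Nat × Nat × Int)),
      Q.foldl (fun ts kv =>
        match kv with
        | ([i, j], v) =>
          if 0 ≤ i ∧ i < n ∧ 0 ≤ j ∧ j < n then
            ts ++ [((n - 1 - i).toNat, (n - 1 - j).toNat, v)]
          else ts
        | _ => ts) acc = acc ++ Q.filterMap (pvF n) by
    simpa using h Q []
  intro Q
  induction Q with
  | nil => simp
  | cons kv Q ih =>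
    intro acc
    obtain ⟨key, v⟩ := kv
    match key with
    | [] => rw [List.foldl_cons]; exact (ih acc).trans (by simp [pvF])
    | [a] => rw [List.foldl_cons]; exact (ih acc).trans (by simp [pvF])
    | a :: b :: c :: rest =>
      rw [List.foldl_cons]; exact (ih acc).trans (by simp [pvF])
    | [a, b] =>
      rw [List.foldl_cons]
      refine (ih _).trans ?_
      by_cases h : 0 ≤ a ∧ a < n ∧ 0 ≤ b ∧ b < n <;> simp [pvF, h]

theorem sum_filterMap_getD {α : Type} (l : List α) (G : α → Option Int) :
    (l.filterMap G).sum = (l.map (fun x => (G x).getD 0)).sum := by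
  induction l with
  | nil => rfl
  | cons x l ih =>
    cases h : G x <;> simp [h, ih]

theorem pvScore_eq_sum (terms : List (Nat × Nat × Int)) (m : Nat) :
    pvScore terms m = (terms.map (fun t => if m.testBit t.1 && m.testBit t.2.1 then t.2.2 else 0)).sum := by
  have : (fun (s : Int) (t : Nat × Nat × Int) => if m.testBit t.1 && m.testBit t.2.1 then s + t.2.2 else s)
      = fun s t => s + (if m.testBit t.1 && m.testBit t.2.1 then t.2.2 else 0) := by
    funext s t; split_ifs <;> simp
  rw [pvScore, this, PySem.List.foldl_add]
  simp

-- the key combinatorial lemma: double sum over lookups = sum over the (nodup-key) entries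
theorem dict_double_sum (k : Nat) (e : Nat → Nat → Int) :
    ∀ (Q : List (List Int × Int)), (Q.map Prod.fst).Nodup →
    (∑ i ∈ Finset.range k, ∑ j ∈ Finset.range k,
      (match (PySem.Dict.mk Q).get? [(i : Int), (j : Int)] with
       | some v => v * e i j
       | none => 0))
    = (Q.map (fun kv =>
        match kv.1 with
        | [a, b] => if 0 ≤ a ∧ a < (k : Int) ∧ 0 ≤ b ∧ b < (k : Int) then kv.2 * e a.toNat b.toNat else 0
        | _ => 0)).sum := by
  intro Q
  induction Q with
  | nil => simp [PySem.Dict.get?]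
  | cons kv Q ih =>
    intro hnd
    obtain ⟨key, v⟩ := kv
    simp only [List.map_cons, List.nodup_cons] at hnd
    obtain ⟨hkey, hnd'⟩ := hnd
    have hget : ∀ x, (PySem.Dict.mk ((key, v) :: Q)).get? x
        = if key = x then some v else (PySem.Dict.mk Q).get? x := by
      intro x; rw [PySem.Dict.get?_mk_cons]; simp
    have hnone : (PySem.Dict.mk Q).get? key = none := by
      rw [PySem.Dict.get?_eq_none_iff_not_mem_keys]
      simpa using hkey
    by_cases hP : ∃ a < k, ∃ b < k, key = [(a : Int), (b : Int)]
    · obtain ⟨a, ha, b, hb, hkeyab⟩ := hP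
      subst hkeyab
      have step : ∀ i ∈ Finset.range k, ∀ j ∈ Finset.range k,
          (match (PySem.Dict.mk (([(a : Int), (b : Int)], v) :: Q)).get? [(i : Int), (j : Int)] with
           | some w => w * e i j
           | none => 0)
          = (match (PySem.Dict.mk Q).get? [(i : Int), (j : Int)] with
             | some w => w * e i j
             | none => 0)
            + (if i = a ∧ j = b then v * e a b else 0) := by
        intro i _ j _
        rw [hget]
        by_cases hij : i = a ∧ j = b
        · obtain ⟨rfl, rfl⟩ := hij
          simp [hnone]
        · rw [if_neg, if_neg hij, add_zero]
          intro h
          simp only [List.cons.injEq, and_true] at h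
          refine hij ⟨?_, ?_⟩ <;> omega
      have inner : ∀ i, (∑ j ∈ Finset.range k, if i = a ∧ j = b then v * e a b else 0)
          = if i = a then v * e a b else 0 := by
        intro i
        by_cases hia : i = a
        · rw [if_pos hia]
          have hpt : ∀ j ∈ Finset.range k,
              (if i = a ∧ j = b then v * e a b else 0) = (if j = b then v * e a b else 0) :=
            fun j _ => by simp [hia]
          rw [Finset.sum_congr rfl hpt,
              Finset.sum_ite_eq' (Finset.range k) b fun _ => v * e a b,
              if_pos (Finset.mem_range.mpr hb)]
        · rw [if_neg hia]
          apply Finset.sum_eq_zero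
          intro j _; rw [if_neg]; tauto
      have hind : (∑ i ∈ Finset.range k, ∑ j ∈ Finset.range k,
          (if i = a ∧ j = b then v * e a b else 0)) = v * e a b := by
        rw [Finset.sum_congr rfl (fun i _ => inner i),
            Finset.sum_ite_eq' (Finset.range k) a fun _ => v * e a b,
            if_pos (Finset.mem_range.mpr ha)]
      rw [Finset.sum_congr rfl (fun i hi => Finset.sum_congr rfl (step i hi))]
      simp only [Finset.sum_add_distrib]
      rw [ih hnd', hind]
      simp only [List.map_cons, List.sum_cons]
      rw [if_pos (by omega)]
      simp only [Int.toNat_natCast]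
      ring
    · push Not at hP
      have step : ∀ i ∈ Finset.range k, ∀ j ∈ Finset.range k,
          (match (PySem.Dict.mk ((key, v) :: Q)).get? [(i : Int), (j : Int)] with
           | some w => w * e i j
           | none => 0)
          = (match (PySem.Dict.mk Q).get? [(i : Int), (j : Int)] with
             | some w => w * e i j
             | none => 0) := by
        intro i hi j hj
        rw [hget, if_neg]
        exact hP i (Finset.mem_range.mp hi) j (Finset.mem_range.mp hj)
      rw [Finset.sum_congr rfl (fun i hi => Finset.sum_congr rfl (step i hi)), ih hnd']
      have hc : (match key with
          | [a, b] => if 0 ≤ a ∧ a < (k : Int) ∧ 0 ≤ b ∧ b < (k : Int) then v * e a.toNat b.toNat else 0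
          | _ => (0 : Int)) = 0 := by
        rcases key with _ | ⟨a, key⟩
        · rfl
        rcases key with _ | ⟨b, key⟩
        · rfl
        rcases key with _ | ⟨c, key⟩
        · show (if 0 ≤ a ∧ a < (k : Int) ∧ 0 ≤ b ∧ b < (k : Int) then v * e a.toNat b.toNat else 0) = 0
          rw [if_neg]
          rintro ⟨h1, h2, h3, h4⟩
          exact hP a.toNat (by omega) b.toNat (by omega) (by
            simp [Int.toNat_of_nonneg h1, Int.toNat_of_nonneg h3])
        · rfl
      simp [hc]

theorem score_eq (Q : List (List Int × Int)) (k : Nat)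
    (hnd : (Q.map Prod.fst).Nodup) (m : Nat) :
    evaluate_qubo Q (pvVecOf k m) = pvScore (pvTerms Q (k : Int)) m := by
  have listFin : ∀ (K : Nat) (f : Nat → Int), ((List.range K).map f).sum = ∑ i ∈ Finset.range K, f i :=
    fun K f => rfl
  have hx : ∀ i : Nat, i < k →
      PySem.List.pyGetD (pvVecOf k m) (i : Int) 0 = (if m.testBit (k - 1 - i) then (1 : Int) else 0) := by
    intro i hi
    rw [PySem.List.pyGetD_natCast, pvVecOf, PySem.List.getD_map_range _ _ _ _ hi]
  have inner_eq : ∀ (s : Int) (i : Int),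
      (PySem.List.pyRange 0 (k : Int) 1).foldl (fun score j =>
        match (PySem.Dict.mk Q).get? [i, j] with
        | some v => score + v * PySem.List.pyGetD (pvVecOf k m) i 0 * PySem.List.pyGetD (pvVecOf k m) j 0
        | none => score) s
      = s + ((List.range k).map (fun j : Nat =>
          match (PySem.Dict.mk Q).get? [i, (j : Int)] with
          | some v => v * PySem.List.pyGetD (pvVecOf k m) i 0 * PySem.List.pyGetD (pvVecOf k m) (j : Int) 0
          | none => 0)).sum := by
    intro s i
    rw [PySem.List.pyRange_zero_natCast, List.foldl_map]
    have hb : (fun (score : Int) (j : Nat) =>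
        match (PySem.Dict.mk Q).get? [i, (j : Int)] with
        | some v => score + v * PySem.List.pyGetD (pvVecOf k m) i 0 * PySem.List.pyGetD (pvVecOf k m) (j : Int) 0
        | none => score)
        = fun (score : Int) (j : Nat) => score + (match (PySem.Dict.mk Q).get? [i, (j : Int)] with
          | some v => v * PySem.List.pyGetD (pvVecOf k m) i 0 * PySem.List.pyGetD (pvVecOf k m) (j : Int) 0
          | none => 0) := by
      funext score j
      cases (PySem.Dict.mk Q).get? [i, (j : Int)] <;> simp
    rw [hb, PySem.List.foldl_add]
  have outer_eq : evaluate_qubo Q (pvVecOf k m)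
      = ((List.range k).map (fun i : Nat =>
          ((List.range k).map (fun j : Nat =>
            match (PySem.Dict.mk Q).get? [(i : Int), (j : Int)] with
            | some v => v * PySem.List.pyGetD (pvVecOf k m) (i : Int) 0 * PySem.List.pyGetD (pvVecOf k m) (j : Int) 0
            | none => 0)).sum)).sum := by
    simp only [evaluate_qubo, pvVecOf_length]
    rw [PySem.List.pyRange_zero_natCast, List.foldl_map]
    have hb : (fun (score : Int) (i : Nat) =>
        List.foldl (fun score j =>
          match (PySem.Dict.mk Q).get? [(i : Int), j] with
          | some v => score + v * PySem.List.pyGetD (pvVecOf k m) (i : Int) 0 * PySem.List.pyGetD (pvVecOf k m) j 0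
          | none => score) score (List.map (fun x : Nat => (x : Int)) (List.range k)))
        = fun (score : Int) (i : Nat) => score + ((List.range k).map (fun j : Nat =>
            match (PySem.Dict.mk Q).get? [(i : Int), (j : Int)] with
            | some v => v * PySem.List.pyGetD (pvVecOf k m) (i : Int) 0 * PySem.List.pyGetD (pvVecOf k m) (j : Int) 0
            | none => 0)).sum := by
      funext score i
      rw [← PySem.List.pyRange_zero_natCast]
      exact inner_eq score (i : Int)
    rw [hb, PySem.List.foldl_add]
    simp
  rw [outer_eq, listFin]
  have hsum : (∑ i ∈ Finset.range k,
      ((List.range k).map (fun j : Nat =>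
        match (PySem.Dict.mk Q).get? [(i : Int), (j : Int)] with
        | some v => v * PySem.List.pyGetD (pvVecOf k m) (i : Int) 0 * PySem.List.pyGetD (pvVecOf k m) (j : Int) 0
        | none => 0)).sum)
      = ∑ i ∈ Finset.range k, ∑ j ∈ Finset.range k,
        (match (PySem.Dict.mk Q).get? [(i : Int), (j : Int)] with
         | some v => v * ((if m.testBit (k - 1 - i) then (1 : Int) else 0) * (if m.testBit (k - 1 - j) then (1 : Int) else 0))
         | none => 0) := by
    refine Finset.sum_congr rfl (fun i hi => ?_)
    rw [listFin]
    refine Finset.sum_congr rfl (fun j hj => ?_)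
    rw [hx i (Finset.mem_range.mp hi), hx j (Finset.mem_range.mp hj)]
    cases (PySem.Dict.mk Q).get? [(i : Int), (j : Int)] <;> simp
  rw [hsum, dict_double_sum k _ Q hnd]
  rw [pvScore_eq_sum, pvTerms_eq, List.map_filterMap, sum_filterMap_getD]
  refine congrArg _ ?_
  refine List.map_congr_left (fun kv _ => ?_)
  obtain ⟨key, v⟩ := kv
  rcases key with _ | ⟨a, key⟩
  · rfl
  rcases key with _ | ⟨b, key⟩
  · rfl
  rcases key with _ | ⟨c, key⟩
  · show (if 0 ≤ a ∧ a < (k : Int) ∧ 0 ≤ b ∧ b < (k : Int)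
        then v * ((if m.testBit (k - 1 - a.toNat) then (1 : Int) else 0) * (if m.testBit (k - 1 - b.toNat) then (1 : Int) else 0))
        else 0)
      = ((pvF (k : Int) ([a, b], v)).map (fun t => if m.testBit t.1 && m.testBit t.2.1 then t.2.2 else 0)).getD 0
    rw [pvF]
    by_cases h : 0 ≤ a ∧ a < (k : Int) ∧ 0 ≤ b ∧ b < (k : Int)
    · rw [if_pos h, if_pos h]
      have h1 : ((k : Int) - 1 - a).toNat = k - 1 - a.toNat := by omega
      have h2 : ((k : Int) - 1 - b).toNat = k - 1 - b.toNat := by omega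
      simp only [Option.map_some, Option.getD_some, h1, h2]
      by_cases t1 : m.testBit (k - 1 - a.toNat) <;> by_cases t2 : m.testBit (k - 1 - b.toNat) <;>
        simp [t1, t2]
    · rw [if_neg h, if_neg h]
      rfl
  · rfl

theorem fold_rel (k : Nat) (g : Nat → Int) (l : List Nat) :
    ∀ (bA : Option (List Int × Int)) (bB : Nat × Option Int),
    bA = bB.2.map (fun s => (pvVecOf k bB.1, s)) →
    (l.foldl (fun best m =>
        match best with
        | none => some (pvVecOf k m, g m)
        | some (_, bs) => if g m < bs then some (pvVecOf k m, g m) else best)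
      bA)
    = ((l.foldl (fun (best : Nat × Option Int) m =>
        match best.2 with
        | none => (m, some (g m))
        | some bs => if g m < bs then (m, some (g m)) else best) bB).2.map
        (fun s => (pvVecOf k (l.foldl (fun (best : Nat × Option Int) m =>
          match best.2 with
          | none => (m, some (g m))
          | some bs => if g m < bs then (m, some (g m)) else best) bB).1, s))) := by
  induction l with
  | nil => intro bA bB h; subst h; rfl
  | cons m l ih =>
    intro bA bB h
    subst h
    obtain ⟨bm, bs⟩ := bB
    cases bs with
    | none =>
      simpa using ih _ (m, some (g m)) rfl
    | some s =>
      by_cases h : g m < s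
      · simpa [h] using ih _ (m, some (g m)) rfl
      · simpa [h] using ih _ (bm, some s) rfl

theorem fold_some (g : Nat → Int) (l : List Nat) :
    ∀ (bB : Nat × Option Int), bB.2.isSome →
    ((l.foldl (fun (best : Nat × Option Int) m =>
        match best.2 with
        | none => (m, some (g m))
        | some bs => if g m < bs then (m, some (g m)) else best) bB).2).isSome := by
  induction l with
  | nil => intro bB h; exact h
  | cons m l ih =>
    intro bB h
    obtain ⟨bm, bs⟩ := bB
    cases bs with
    | none => simp at h
    | some s =>
      by_cases hlt : g m < s
      · simpa [hlt] using ih (m, some (g m)) rfl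
      · simpa [hlt] using ih (bm, some s) rfl

theorem tail_eq (k : Nat) (g : Nat → Int) :
    (match List.foldl (fun best m =>
        match best with
        | none => some (pvVecOf k m, g m)
        | some (_, bs) => if g m < bs then some (pvVecOf k m, g m) else best)
        none (List.range (2 ^ k)) with
      | some (v, s) => (v, s)
      | none => (([] : List Int), (0 : Int)))
    = ((List.range k).map (fun i =>
        if (List.foldl (fun (best : Nat × Option Int) m =>
            match best.2 with
            | none => (m, some (g m))
            | some bs => if g m < bs then (m, some (g m)) else best) (0, none) (List.range (2 ^ k))).1.testBit (k - 1 - i)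
        then (1 : Int) else 0),
       (List.foldl (fun (best : Nat × Option Int) m =>
            match best.2 with
            | none => (m, some (g m))
            | some bs => if g m < bs then (m, some (g m)) else best) (0, none) (List.range (2 ^ k))).2.getD 0) := by
  rw [fold_rel k g (List.range (2 ^ k)) none (0, none) rfl]
  have hrsome : ((List.range (2 ^ k)).foldl (fun (best : Nat × Option Int) m =>
      match best.2 with
      | none => (m, some (g m))
      | some bs => if g m < bs then (m, some (g m)) else best) (0, none)).2.isSome := by
    rcases hl : List.range (2 ^ k) with _ | ⟨c, rest⟩
    · exfalso
      have h0 := congrArg List.length hl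
      have hpos := Nat.two_pow_pos k
      simp only [List.length_range, List.length_nil] at h0
      omega
    · rw [List.foldl_cons]
      exact fold_some g rest _ rfl
  obtain ⟨bs, hbs⟩ := Option.isSome_iff_exists.mp hrsome
  rw [hbs]
  simp only [Option.map_some, Option.getD_some]
  rfl

theorem main_eq (Q : List (List Int × Int)) (n : Int) (hn : 0 ≤ n)
    (hnd : (Q.map Prod.fst).Nodup) :
    brute_force_solve Q n = brute_force_solve_alt Q n := by
  obtain ⟨k, rfl⟩ : ∃ k : Nat, n = (k : Int) := ⟨n.toNat, (Int.toNat_of_nonneg hn).symm⟩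
  rw [brute_force_solve, brute_force_solve_alt]
  simp only [Int.toNat_natCast]
  rw [pyProduct01_eq, List.foldl_map]
  simp only [score_eq Q k hnd]
  exact tail_eq k (pvScore (pvTerms Q (k : Int)))

-- ===== VERDICT (by name: the statement is the Claim_ definition above) =====
theorem brute_force_solve_spec : Claim_equal_brute_force_solve := by
  intro Q n _ hpre
  exact main_eq Q n hpre.1 hpre.2
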